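-- pv_equiv track=rewrite | github.com/aarya0044/chatbot | app.py | explain_memory
-- ===== SOURCE A (Python) =====
-- def explain_memory(messages):
--     past = [m[1] for m in messages if m[0] == "user"]
--     if len(past) < 2:
--         return "This response did not rely on earlier memory."
--     return (
--         "I remembered this because earlier you said:\n\n"
--         f"> *{past[-2]}*\n\n"
--         "That information influenced this response."
--     )
-- ===== SOURCE B (Python) =====
-- def explain_memory(messages):
--     seen = 0
--     for m in reversed(messages):
--         if m[0] == "user":
--             if seen == 1:
--                 return (
--                     "I remembered this because earlier you said:\n\n"
--                     f"> *{m[1]}*\n\n"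
--                     "That information influenced this response."
--                 )
--             seen += 1
--     return "This response did not rely on earlier memory."
-- ===== Notes on version B (the rewrite author's own statement) =====
-- stated objective: alternative
-- what changed: Instead of materialising the full list of user-message texts and indexing it at [-2], B scans the messages once in reverse with a counter, skips the first user message it meets and returns as soon as it meets the second, never building an intermediate list.
import Mathlib
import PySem

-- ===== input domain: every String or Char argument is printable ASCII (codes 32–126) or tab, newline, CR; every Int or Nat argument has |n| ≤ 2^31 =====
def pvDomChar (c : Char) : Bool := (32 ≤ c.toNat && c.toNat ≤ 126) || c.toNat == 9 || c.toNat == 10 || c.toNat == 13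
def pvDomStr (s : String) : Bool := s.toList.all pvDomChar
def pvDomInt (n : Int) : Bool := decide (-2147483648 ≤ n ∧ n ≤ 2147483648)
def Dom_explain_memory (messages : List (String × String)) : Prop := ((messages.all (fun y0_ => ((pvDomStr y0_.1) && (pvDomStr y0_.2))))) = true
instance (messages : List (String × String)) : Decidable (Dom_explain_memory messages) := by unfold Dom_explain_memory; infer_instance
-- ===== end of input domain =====

-- B replaces A's build-a-list-then-index-[-2] with a single reverse scan that returns at the second user message; alternative decomposition, same cost.


-- ===== PORT A =====
def explain_memory (messages : List (String × String)) : String :=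
  let past := (messages.filter (fun m => m.1 == "user")).map (fun m => m.2)
  if past.length < 2 then
    "This response did not rely on earlier memory."
  else
    "I remembered this because earlier you said:\n\n> *"
      ++ PySem.List.pyGetD past (-2) ""   -- past[-2]; in range because past.length ≥ 2
      ++ "*\n\nThat information influenced this response."

-- ===== PORT B =====
-- the reverse scan of Source B: `seen` counts user rows already met; return at the second
def explainGo : List (String × String) → Nat → String
  | [], _ => "This response did not rely on earlier memory."
  | m :: rest, seen =>
    if m.1 == "user" then
      if seen == 1 then
        "I remembered this because earlier you said:\n\n> *"
          ++ m.2
          ++ "*\n\nThat information influenced this response."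
      else explainGo rest (seen + 1)
    else explainGo rest seen

def explain_memory_alt (messages : List (String × String)) : String :=
  explainGo messages.reverse 0

-- ===== PRECONDITION & SPEC =====
def Spec_explain_memory (messages : List (String × String)) (out : String) : Prop := out = explain_memory_alt messages
instance (messages : List (String × String)) (out : String) : Decidable (Spec_explain_memory messages out) := by unfold Spec_explain_memory; infer_instance

-- ===== CLAIM (what is proved, stated in full; the proofs are below) =====
def Claim_equal_explain_memory : Prop := ∀ (messages : List (String × String)), Dom_explain_memory messages → Spec_explain_memory messages (explain_memory messages)

-- ===== LEMMAS AND PROOFS =====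

-- with one user message already seen, the scan returns at the first user row it meets
theorem explainGo_one (l : List (String × String)) :
    explainGo l 1 =
      match (l.filter (fun m => m.1 == "user")).map (fun m => m.2) with
      | [] => "This response did not rely on earlier memory."
      | t :: _ =>
        "I remembered this because earlier you said:\n\n> *"
          ++ t ++ "*\n\nThat information influenced this response." := by
  induction l with
  | nil => rfl
  | cons m rest ih =>
    by_cases h : m.1 == "user" <;> simp [explainGo, h, ih]

-- starting fresh, the scan returns at the second user row it meets
theorem explainGo_zero (l : List (String × String)) :
    explainGo l 0 =
      match (l.filter (fun m => m.1 == "user")).map (fun m => m.2) with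
      | _ :: t2 :: _ =>
        "I remembered this because earlier you said:\n\n> *"
          ++ t2 ++ "*\n\nThat information influenced this response."
      | _ => "This response did not rely on earlier memory." := by
  induction l with
  | nil => rfl
  | cons m rest ih =>
    by_cases h : m.1 == "user"
    · simp only [explainGo, h, if_true, List.filter_cons, List.map_cons]
      rw [explainGo_one rest]
      cases hr : (rest.filter (fun m => m.1 == "user")).map (fun m => m.2) <;> simp
    · simp [explainGo, h, ih]

-- ===== VERDICT (by name: the statement is the Claim_ definition above) =====
theorem explain_memory_spec : Claim_equal_explain_memory := by
  intro messages _
  unfold Spec_explain_memory explain_memory explain_memory_alt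
  rw [explainGo_zero]
  simp only [List.filter_reverse, List.map_reverse]
  set past := (messages.filter (fun m => m.1 == "user")).map (fun m => m.2) with hp
  clear_value past
  clear hp
  by_cases h2 : past.length < 2
  · simp only [h2, if_true]
    match hr : past.reverse with
    | [] => simp
    | [t] => simp
    | t1 :: t2 :: r =>
      exfalso
      have := congrArg List.length hr
      simp at this; omega
  · simp only [h2, if_false]
    match hr : past.reverse with
    | [] => exfalso; have := congrArg List.length hr
            simp only [List.length_reverse, List.length_nil] at this; omega
    | [t] => exfalso; have := congrArg List.length hr
             simp only [List.length_reverse, List.length_cons, List.length_nil] at this; omega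
    | t :: t2 :: r =>
      have hpast : past = r.reverse ++ [t2, t] := by
        have := congrArg List.reverse hr
        simpa using this
      have hlen : 2 ≤ past.length := by omega
      rw [PySem.List.pyGetD_neg_ofNat past 2 "" (by omega) hlen]
      subst hpast
      simp [List.getElem_append_right]
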